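-- pv_equiv track=rewrite | github.com/SigmaLDC/2020MLproject | 数据处理/Data.py | build_chars_dict
-- ===== SOURCE A (Python) =====
-- def build_chars_dict(input_file):
--     """
--     :param input_file: 输入文件的列表形式
--     :return: 字典, 用于初始化chars
--     建立chars字典, 字典的key是字符, value是对应的index, index从1开始
--     """
--     chars_dict = {}
--     index = 1
--
--     for item in input_file:
--         if item != '':
--             char = item[0]
--             if chars_dict.get(char, 0) == 0:
--                 chars_dict[char] = index
--                 index += 1
--
--     return chars_dict
-- ===== SOURCE B (Python) =====
-- def build_chars_dict(input_file):
--     """Record the first-occurrence position of each leading character, then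
--     rank the characters by that position to obtain their 1-based indices."""
--     first_pos = {}
--     for pos, item in enumerate(input_file):
--         if item != '':
--             first_pos.setdefault(item[0], pos)
--     order = sorted(first_pos, key=first_pos.get)
--     return {c: rank for rank, c in enumerate(order, 1)}
-- ===== Notes on version B (the rewrite author's own statement) =====
-- stated objective: alternative
-- what changed: A assigns indices on the fly with a hand-kept counter and a membership test in one loop; B instead records each leading character's first-occurrence POSITION via setdefault and then ranks the characters by sorting on those positions, numbering the sorted order from 1.
import Mathlib
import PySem

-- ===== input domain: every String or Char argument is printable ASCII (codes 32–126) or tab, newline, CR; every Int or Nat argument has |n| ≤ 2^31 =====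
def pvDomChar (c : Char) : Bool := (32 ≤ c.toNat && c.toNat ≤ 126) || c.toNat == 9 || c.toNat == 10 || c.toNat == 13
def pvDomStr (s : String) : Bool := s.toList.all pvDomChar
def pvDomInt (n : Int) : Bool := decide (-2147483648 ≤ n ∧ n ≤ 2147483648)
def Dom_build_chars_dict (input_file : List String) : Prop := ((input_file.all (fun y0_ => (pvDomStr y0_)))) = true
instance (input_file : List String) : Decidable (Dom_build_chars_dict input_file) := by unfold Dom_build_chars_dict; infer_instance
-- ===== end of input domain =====

-- B replaces A's single counter-carrying loop by a different algorithm: record each leading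
-- character's first-occurrence position with setdefault, then rank the characters by sorting
-- on those positions and number the sorted order from 1. (alternative)

-- ===== PORT A =====
def build_chars_dict (input_file : List String) : List (String × Int) :=
  (input_file.foldl
    (fun (st : PySem.Dict String Int × Int) item =>
      if item ≠ "" then
        match PySem.Str.pyGet? item 0 with   -- item[0]; some _ whenever item ≠ ""
        | some c =>
            let char := String.mk [c]
            if st.1.getD char 0 = 0 then (st.1.insert char st.2, st.2 + 1) else st
        | none => st
      else st)
    (PySem.Dict.empty, 1)).1.items

-- ===== PORT B =====
def build_chars_dict_alt (input_file : List String) : List (String × Int) :=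
  let first_pos := (PySem.List.enumerate input_file 0).foldl
    (fun (d : PySem.Dict String Int) p =>
      if p.2 ≠ "" then
        match PySem.Str.pyGet? p.2 0 with    -- item[0]; some _ whenever item ≠ ""
        | some c => d.setdefault (String.mk [c]) p.1
        | none => d
      else d) PySem.Dict.empty
  let order := PySem.List.sorted first_pos.keys (fun c => first_pos.getD c 0) false
  (PySem.List.enumerate order 1).map (fun p => (p.2, p.1))

-- ===== PRECONDITION & SPEC =====
def Spec_build_chars_dict (input_file : List String) (out : List (String × Int)) : Prop := out = build_chars_dict_alt input_file
instance (input_file : List String) (out : List (String × Int)) : Decidable (Spec_build_chars_dict input_file out) := by unfold Spec_build_chars_dict; infer_instance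

-- ===== CLAIM (what is proved, stated in full; the proofs are below) =====
def Claim_equal_build_chars_dict : Prop := ∀ (input_file : List String), Dom_build_chars_dict input_file → Spec_build_chars_dict input_file (build_chars_dict input_file)

-- ===== LEMMAS AND PROOFS =====

-- item[0] of a non-empty item, as a 1-character string
def pvFirst (item : String) : String :=
  match PySem.Str.pyGet? item 0 with
  | some c => String.mk [c]
  | none => ""

-- the loop body of A, on the already-extracted first character
def pvStep (st : PySem.Dict String Int × Int) (c : String) : PySem.Dict String Int × Int :=
  if st.1.getD c 0 = 0 then (st.1.insert c st.2, st.2 + 1) else st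

-- the items of a dict mapping s[i] ↦ k + i
def pvE (s : List String) (k : Int) : List (String × Int) :=
  (PySem.List.enumerate s k).map (fun p => (p.2, p.1))

lemma pvE_nil (k : Int) : pvE [] k = [] := rfl

lemma pvE_cons (c : String) (s : List String) (k : Int) :
    pvE (c :: s) k = (c, k) :: pvE s (k + 1) := by
  simp [pvE, PySem.List.enumerate_cons]

lemma pvE_append (s : List String) (c : String) (k : Int) :
    pvE (s ++ [c]) k = pvE s k ++ [(c, k + s.length)] := by
  induction s generalizing k with
  | nil => simp [pvE_nil, pvE_cons]
  | cons a t ih =>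
      simp only [List.cons_append, pvE_cons, ih, List.length_cons]
      push_cast
      ring_nf

lemma pvE_keys (s : List String) (k : Int) :
    (PySem.Dict.mk (pvE s k)).keys = s := by
  simp [PySem.Dict.keys, pvE, List.map_map, Function.comp_def, PySem.List.map_snd_enumerate]

lemma pvE_getD_eq_zero (s : List String) (k : Int) (hk : 1 ≤ k) (c : String) :
    ((PySem.Dict.mk (pvE s k)).getD c 0 = 0) ↔ c ∉ s := by
  induction s generalizing k with
  | nil => simp [pvE_nil, PySem.Dict.getD_eq_get?_getD, PySem.Dict.get?]
  | cons a t ih =>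
      rw [pvE_cons]
      by_cases hca : c = a
      · subst hca
        simp [PySem.Dict.getD_eq_get?_getD, PySem.Dict.get?_mk_cons]
        omega
      · have h1 : ((PySem.Dict.mk ((a, k) :: pvE t (k + 1))).getD c 0)
            = (PySem.Dict.mk (pvE t (k + 1))).getD c 0 := by
          simp [PySem.Dict.getD_eq_get?_getD, PySem.Dict.get?_mk_cons,
            show (a == c) = false by simp [Ne.symm hca]]
        rw [h1, ih (k + 1) (by omega)]
        simp [hca]

lemma pv_main (cs : List String) : ∀ (s : List String),
    (cs.foldl pvStep (PySem.Dict.mk (pvE s 1), (s.length : Int) + 1)).1.items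
      = pvE (cs.foldl PySem.Set.add s) 1 := by
  induction cs with
  | nil => intro s; simp [pvE]
  | cons c t ih =>
      intro s
      simp only [List.foldl_cons]
      by_cases hc : c ∈ s
      · have hz : ¬ ((PySem.Dict.mk (pvE s 1)).getD c 0 = 0) := by
          rw [pvE_getD_eq_zero s 1 (by omega) c]; simp [hc]
        rw [show pvStep (PySem.Dict.mk (pvE s 1), (s.length : Int) + 1) c
              = (PySem.Dict.mk (pvE s 1), (s.length : Int) + 1) by
            simp [pvStep, hz]]
        rw [PySem.Set.add_of_mem hc]
        exact ih s
      · have hz : (PySem.Dict.mk (pvE s 1)).getD c 0 = 0 := by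
          rw [pvE_getD_eq_zero s 1 (by omega) c]; exact hc
        have hcont : (PySem.Dict.mk (pvE s 1)).contains c = false := by
          rw [PySem.Dict.contains_eq_decide_mem_keys, pvE_keys]
          simp [hc]
        have hins : (PySem.Dict.mk (pvE s 1)).insert c ((s.length : Int) + 1)
            = PySem.Dict.mk (pvE (s ++ [c]) 1) := by
          apply PySem.Dict.ext
          rw [PySem.Dict.items_insert_of_not_contains _ _ hcont, pvE_append]
          simp [Int.add_comm]
        rw [show pvStep (PySem.Dict.mk (pvE s 1), (s.length : Int) + 1) c
              = ((PySem.Dict.mk (pvE s 1)).insert c ((s.length : Int) + 1),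
                 ((s.length : Int) + 1) + 1) by
            simp [pvStep, hz]]
        rw [hins, PySem.Set.add_of_not_mem hc]
        have hlen : ((s.length : Int) + 1) + 1 = (((s ++ [c]).length : Int) + 1) := by
          simp
        rw [hlen]
        exact ih (s ++ [c])

lemma pv_first_of_ne (item : String) (h : item ≠ "") :
    ∃ c, PySem.List.pyGet? item.toList 0 = some c := by
  have htl : item.toList ≠ [] := by
    intro hnil
    exact h (by have := congrArg String.ofList hnil; simpa using this)
  cases hl : item.toList with
  | nil => exact absurd hl htl
  | cons c t =>
      exact ⟨c, by simp [PySem.List.pyGet?, PySem.List.pyIdx?]⟩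

-- ---- B-side lemmas ----

-- B's setdefault loop, after the empty-item filter
def pvFold (l : List (Int × String)) (d : PySem.Dict String Int) : PySem.Dict String Int :=
  l.foldl (fun d p => d.setdefault (pvFirst p.2) p.1) d

-- invariant of B's loop: keys grow like a Set.add fold, stay Nodup, values stay strictly increasing
lemma pvB (l : List (Int × String)) : ∀ (d : PySem.Dict String Int),
    d.keys.Nodup →
    d.items.Pairwise (fun p q => p.2 < q.2) →
    (∀ p ∈ d.items, ∀ q ∈ l, p.2 < q.1) →
    l.Pairwise (fun p q => p.1 < q.1) →
    (pvFold l d).keys = (l.map (fun p => pvFirst p.2)).foldl PySem.Set.add d.keys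
    ∧ (pvFold l d).keys.Nodup
    ∧ (pvFold l d).items.Pairwise (fun p q => p.2 < q.2) := by
  induction l with
  | nil => intro d hnd hpw _ _; exact ⟨rfl, hnd, hpw⟩
  | cons a t ih =>
      intro d hnd hpw hbnd hl
      obtain ⟨i, s⟩ := a
      have hfold : pvFold ((i, s) :: t) d = pvFold t (d.setdefault (pvFirst s) i) := rfl
      have hl' : t.Pairwise (fun p q => p.1 < q.1) := hl.of_cons
      have hlt : ∀ q ∈ t, i < q.1 := by
        intro q hq; exact (List.pairwise_cons.mp hl).1 q hq
      by_cases hc : d.contains (pvFirst s) = true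
      · have hsd : d.setdefault (pvFirst s) i = d := PySem.Dict.setdefault_of_contains _ _ hc
        have hmem : pvFirst s ∈ d.keys := (PySem.Dict.contains_iff_mem_keys _ _).mp hc
        rw [hfold, hsd]
        have := ih d hnd hpw (fun p hp q hq => hbnd p hp q (List.mem_cons_of_mem _ hq)) hl'
        refine ⟨?_, this.2.1, this.2.2⟩
        rw [this.1]
        simp only [List.map_cons, List.foldl_cons, PySem.Set.add_of_mem hmem]
      · have hc' : d.contains (pvFirst s) = false := by simpa using hc
        have hnm : pvFirst s ∉ d.keys := by
          intro hm; exact hc ((PySem.Dict.contains_iff_mem_keys _ _).mpr hm)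
        have hsd : d.setdefault (pvFirst s) i = d.insert (pvFirst s) i :=
          PySem.Dict.setdefault_of_not_contains _ _ hc'
        have hitems : (d.insert (pvFirst s) i).items = d.items ++ [(pvFirst s, i)] :=
          PySem.Dict.items_insert_of_not_contains _ _ hc'
        have hkeys : (d.insert (pvFirst s) i).keys = d.keys ++ [pvFirst s] :=
          PySem.Dict.keys_insert_of_not_contains _ _ hc'
        have hnd' : (d.insert (pvFirst s) i).keys.Nodup := by
          rw [hkeys]
          simpa [List.nodup_append] using ⟨hnd, fun a ha h => hnm (h ▸ ha)⟩
        have hpw' : (d.insert (pvFirst s) i).items.Pairwise (fun p q => p.2 < q.2) := by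
          rw [hitems, List.pairwise_append]
          refine ⟨hpw, List.pairwise_singleton _ _, ?_⟩
          intro p hp q hq
          simp only [List.mem_singleton] at hq
          subst hq
          exact hbnd p hp (i, s) (List.mem_cons_self)
        have hbnd' : ∀ p ∈ (d.insert (pvFirst s) i).items, ∀ q ∈ t, p.2 < q.1 := by
          intro p hp q hq
          rw [hitems] at hp
          rcases List.mem_append.mp hp with hp | hp
          · exact hbnd p hp q (List.mem_cons_of_mem _ hq)
          · simp only [List.mem_singleton] at hp
            subst hp
            exact hlt q hq
        rw [hfold, hsd]
        have := ih (d.insert (pvFirst s) i) hnd' hpw' hbnd' hl'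
        refine ⟨?_, this.2.1, this.2.2⟩
        rw [this.1, hkeys]
        simp only [List.map_cons, List.foldl_cons, PySem.Set.add_of_not_mem hnm]

-- keys of such a dict are already sorted by their stored position
lemma pvKeysSorted (d : PySem.Dict String Int) (hnd : d.keys.Nodup)
    (hpw : d.items.Pairwise (fun p q => p.2 < q.2)) :
    PySem.List.sorted d.keys (fun c => d.getD c 0) false = d.keys := by
  apply PySem.List.sorted_eq_self_of_pairwise
  have hk : d.keys = d.items.map Prod.fst := rfl
  rw [hk, List.pairwise_map]
  refine hpw.imp_of_mem ?_
  intro p q hp hq hlt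
  have hp' : (p.1, p.2) ∈ d.items := by simpa using hp
  have hq' : (q.1, q.2) ∈ d.items := by simpa using hq
  rw [PySem.Dict.getD_of_mem_items _ hp' hnd 0, PySem.Dict.getD_of_mem_items _ hq' hnd 0]
  omega

-- filtering the empty items commutes with enumerate, for the first-character projection
lemma pvFiltEnum (xs : List String) : ∀ (s : Int),
    (((PySem.List.enumerate xs s).filter (fun p => decide (p.2 ≠ ""))).map
        (fun p => pvFirst p.2))
      = (xs.filter (fun x => decide (x ≠ ""))).map pvFirst := by
  induction xs with
  | nil => intro s; rfl
  | cons a t ih =>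
      intro s
      by_cases h : a = ""
      · subst h; simpa [PySem.List.enumerate_cons] using ih (s + 1)
      · simpa [PySem.List.enumerate_cons, h] using ih (s + 1)

-- ===== VERDICT (by name: the statement is the Claim_ definition above) =====
theorem build_chars_dict_spec : Claim_equal_build_chars_dict := by
  intro input_file _
  show build_chars_dict input_file = build_chars_dict_alt input_file
  unfold build_chars_dict build_chars_dict_alt
  -- A's side: rewrite to pvE (ordered-dedup of the first characters) 1
  have hstep : (fun (st : PySem.Dict String Int × Int) (item : String) =>
      if item ≠ "" then
        match PySem.Str.pyGet? item 0 with
        | some c =>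
            let char := String.mk [c]
            if st.1.getD char 0 = 0 then (st.1.insert char st.2, st.2 + 1) else st
        | none => st
      else st)
      = fun st item => if item ≠ "" then pvStep st (pvFirst item) else st := by
    funext st item
    by_cases h : item = ""
    · simp [h]
    · obtain ⟨c, hc⟩ := pv_first_of_ne item h
      simp [h, hc, pvStep, pvFirst, PySem.Str.pyGet?]
  rw [hstep, PySem.List.foldl_ite_eq_foldl_filter, ← List.foldl_map (f := pvFirst)]
  have h0 : (PySem.Dict.empty, (1 : Int))
      = (PySem.Dict.mk (pvE ([] : List String) 1), ((List.length ([] : List String) : Int) + 1)) := by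
    simp [PySem.Dict.empty, pvE_nil]
  rw [h0, pv_main]
  -- B's side: rewrite the loop body to the filtered setdefault fold pvFold
  have hstep' : (fun (d : PySem.Dict String Int) (p : Int × String) =>
      if p.2 ≠ "" then
        match PySem.Str.pyGet? p.2 0 with
        | some c => d.setdefault (String.mk [c]) p.1
        | none => d
      else d)
      = fun d p => if p.2 ≠ "" then d.setdefault (pvFirst p.2) p.1 else d := by
    funext d p
    by_cases h : p.2 = ""
    · simp [h]
    · obtain ⟨c, hc⟩ := pv_first_of_ne p.2 h
      simp [h, hc, pvFirst, PySem.Str.pyGet?]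
  rw [hstep', PySem.List.foldl_ite_eq_foldl_filter]
  dsimp only
  set l := (PySem.List.enumerate input_file 0).filter (fun p => decide (p.2 ≠ "")) with hl
  have hlpw : l.Pairwise (fun p q => p.1 < q.1) :=
    (PySem.List.pairwise_lt_enumerate input_file 0).sublist List.filter_sublist
  have hinv := pvB l PySem.Dict.empty (by simp) (by simp [PySem.Dict.empty])
    (by simp [PySem.Dict.empty]) hlpw
  have hfold : l.foldl (fun d p => d.setdefault (pvFirst p.2) p.1) PySem.Dict.empty = pvFold l PySem.Dict.empty := rfl
  rw [hfold, pvKeysSorted _ hinv.2.1 hinv.2.2, hinv.1]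
  have hkeys0 : (PySem.Dict.empty : PySem.Dict String Int).keys = [] := rfl
  rw [hkeys0, hl, pvFiltEnum input_file 0]
  rfl
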